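-- pv_equiv track=rewrite | github.com/NoraCodes/pyparens | parens/parse.py | preparse
-- ===== SOURCE A (Python) =====
-- def preparse(tokens):
--     """
--     Break up a tokenized source into lists; this allows input like
--     pl> (a, b) (c, d)
--     to work as expected.
--     """
--     count_open = 0
--     lists = []
--     current_list = []
--
--     if len(tokens) == 0:
--         raise SyntaxError("Unexpected EOF while preparsing.")
--
--     for token in tokens:
--         if token == '(':
--             count_open += 1
--             current_list.append('(')
--         elif token == '\'(':
--             count_open += 1
--             current_list.append('\'(')
--         elif token == ')':
--             if count_open == 0:
--                 # Too many closing parens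
--                 raise SyntaxError(" Unexpected ) while preparsing!")
--             count_open -= 1
--             current_list.append(')')
--             if count_open == 0:
--                 # This list is done; split it off and start a new one
--                 lists.append(current_list)
--                 current_list = []
--         else:
--             # Any other token
--             current_list.append(token)
--             continue
--
--         # Once the loop is done, there can't be any remaining open
--         #   parentheses, or the source is unbalanced
--     if count_open != 0:
--         raise SyntaxError("Missing a closing parenthesis while" +
--                           "preparsing ({}).".format(count_open))
--
--     return lists
-- ===== SOURCE B (Python) =====
-- def preparse(tokens):
--     """Split tokens into balanced parenthesized groups: index pass + slicing."""
--     if len(tokens) == 0: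
--         raise SyntaxError("Unexpected EOF while preparsing.")
--     depth = 0
--     bounds = []
--     for i, tok in enumerate(tokens):
--         if tok == '(' or tok == '\'(':
--             depth += 1
--         elif tok == ')':
--             if depth == 0:
--                 raise SyntaxError(" Unexpected ) while preparsing!")
--             depth -= 1
--             if depth == 0:
--                 bounds.append(i + 1)
--     if depth != 0:
--         raise SyntaxError("Missing a closing parenthesis while" +
--                           "preparsing ({}).".format(depth))
--     return [tokens[a:b] for a, b in zip([0] + bounds, bounds)]
-- ===== Notes on version B (the rewrite author's own statement) =====
-- stated objective: alternative
-- what changed: B replaces A's group-accumulator loop (building each group token by token and splitting it off when the paren depth returns to 0) by a depth-counting index pass that only records group-end boundaries, then produces the groups by slicing the token list between consecutive boundaries.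
import Mathlib
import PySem

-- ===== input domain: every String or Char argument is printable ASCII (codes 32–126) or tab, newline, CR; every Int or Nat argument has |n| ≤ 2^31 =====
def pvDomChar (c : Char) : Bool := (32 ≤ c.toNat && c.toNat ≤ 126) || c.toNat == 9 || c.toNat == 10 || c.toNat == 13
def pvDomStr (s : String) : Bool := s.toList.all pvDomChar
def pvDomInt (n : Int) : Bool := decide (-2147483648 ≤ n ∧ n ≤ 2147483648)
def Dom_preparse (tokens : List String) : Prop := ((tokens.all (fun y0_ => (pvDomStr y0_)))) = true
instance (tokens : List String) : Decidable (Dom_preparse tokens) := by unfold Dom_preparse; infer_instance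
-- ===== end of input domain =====

-- B replaces A's group-accumulator loop by an index pass that records group-end
-- boundaries and then slices the token list; same values, alternative decomposition.

-- ===== PORT A =====
-- A's loop over tokens with state (count_open, lists, current_list); a SyntaxError
-- is represented by `none` (all such inputs are excluded by Pre_preparse).
def preparseGo : List String → Int → List (List String) → List String → Option (List (List String))
  | [], c, ls, _cur => if c ≠ 0 then none else some ls
  | t :: ts, c, ls, cur =>
    if t = "(" then preparseGo ts (c + 1) ls (cur ++ ["("])
    else if t = "'(" then preparseGo ts (c + 1) ls (cur ++ ["'("])
    else if t = ")" then
      if c = 0 then none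
      else if c - 1 = 0 then preparseGo ts (c - 1) (ls ++ [cur ++ [")"]]) []
      else preparseGo ts (c - 1) ls (cur ++ [")"])
    else preparseGo ts c ls (cur ++ [t])

def preparse (tokens : List String) : List (List String) :=
  if tokens = [] then []          -- Python raises SyntaxError here (outside Pre_)
  else match preparseGo tokens 0 [] [] with
    | some r => r
    | none => []                  -- Python raises SyntaxError here (outside Pre_)

-- ===== PORT B =====
-- B's index pass: running depth, recording i+1 whenever a ')' returns depth to 0.
def preparseBounds : List String → Nat → Int → List Nat → Option (List Nat)
  | [], _, d, bs => if d ≠ 0 then none else some bs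
  | t :: ts, i, d, bs =>
    if t = "(" ∨ t = "'(" then preparseBounds ts (i + 1) (d + 1) bs
    else if t = ")" then
      if d = 0 then none
      else if d - 1 = 0 then preparseBounds ts (i + 1) (d - 1) (bs ++ [i + 1])
      else preparseBounds ts (i + 1) (d - 1) bs
    else preparseBounds ts (i + 1) d bs

def preparse_alt (tokens : List String) : List (List String) :=
  if tokens = [] then []          -- Python raises SyntaxError here (outside Pre_)
  else match preparseBounds tokens 0 0 [] with
    | some bs =>
      -- tokens[a:b] with 0 ≤ a ≤ b nonneg Nat indices: exact as drop/take
      (List.zip (0 :: bs) bs).map (fun ab => (tokens.drop ab.1).take (ab.2 - ab.1))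
    | none => []                  -- Python raises SyntaxError here (outside Pre_)

-- ===== PRECONDITION & SPEC =====
def preparseDelta (t : String) : Int :=
  if t = "(" ∨ t = "'(" then 1 else if t = ")" then -1 else 0

-- Pre_ = exactly the inputs where Python A returns (no SyntaxError): the token
-- list is nonempty and paren-balanced (no prefix closes more than it opened,
-- and every open paren is closed).
def Pre_preparse (tokens : List String) : Prop :=
  tokens ≠ [] ∧ (tokens.map preparseDelta).sum = 0 ∧
    ∀ p ∈ tokens.inits, 0 ≤ (p.map preparseDelta).sum

instance (tokens : List String) : Decidable (Pre_preparse tokens) := by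
  unfold Pre_preparse; infer_instance

def pvWitness_preparse : List String := ["(", "a", ")", "(", "b", ")"]

def Spec_preparse (tokens : List String) (out : List (List String)) : Prop := out = preparse_alt tokens
instance (tokens : List String) (out : List (List String)) : Decidable (Spec_preparse tokens out) := by unfold Spec_preparse; infer_instance

-- ===== CLAIM (what is proved, stated in full; the proofs are below) =====
def Claim_equal_preparse : Prop := ∀ (tokens : List String), Dom_preparse tokens → Pre_preparse tokens → Spec_preparse tokens (preparse tokens)

-- ===== LEMMAS AND PROOFS =====

-- interpretation of a boundary list as slices, with a running start index
def sliceChain (full : List String) (p : Nat) : List Nat → List (List String)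
  | [] => []
  | b :: bs => ((full.drop p).take (b - p)) :: sliceChain full b bs

lemma sliceChain_eq_zipmap (full : List String) :
    ∀ (bs : List Nat) (p : Nat),
      (List.zip (p :: bs) bs).map (fun ab => (full.drop ab.1).take (ab.2 - ab.1))
        = sliceChain full p bs := by
  intro bs
  induction bs with
  | nil => intro p; simp [sliceChain]
  | cons b bs ih =>
      intro p
      simp only [List.zip_cons_cons, List.map_cons, sliceChain]
      rw [ih b]

lemma sliceChain_snoc (full : List String) :
    ∀ (bs : List Nat) (p x : Nat),
      sliceChain full p (bs ++ [x])
        = sliceChain full p bs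
            ++ [((full.drop (bs.getLastD p)).take (x - bs.getLastD p))] := by
  intro bs
  induction bs with
  | nil => intro p x; simp [sliceChain]
  | cons b bs ih =>
      intro p x
      simp only [List.cons_append, sliceChain, ih b, List.getLastD_cons]

lemma take_succ_of_drop {α} (full : List α) (p i : Nat) (t : α) (ts : List α)
    (hp : p ≤ i) (hd : full.drop i = t :: ts) :
    (full.drop p).take (i + 1 - p) = (full.drop p).take (i - p) ++ [t] := by
  have hi : i < full.length := by
    by_contra h
    rw [List.drop_eq_nil_of_le (Nat.le_of_not_lt h)] at hd
    simp at hd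
  have hget : full.drop p = (full.drop p).take (i - p) ++ full.drop i := by
    calc full.drop p = (full.take i).drop p ++ full.drop i := by
            rw [← List.drop_append_of_le_length
                  (by simp [List.length_take]; omega),
                List.take_append_drop]
         _ = (full.drop p).take (i - p) ++ full.drop i := by
            rw [List.drop_take]
  calc (full.drop p).take (i + 1 - p)
      = ((full.drop p).take (i - p) ++ full.drop i).take (i + 1 - p) := by rw [← hget]
    _ = (full.drop p).take (i - p) ++ [t] := by
        rw [hd]
        have hlen : ((full.drop p).take (i - p)).length = i - p := by
          simp [List.length_take, List.length_drop]
          omega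
        rw [show i + 1 - p = ((full.drop p).take (i - p)).length + 1 by omega,
            List.take_length_add_append]
        simp [List.take_succ_cons]

lemma main_invariant (full : List String) :
    ∀ (ts : List String) (i : Nat) (c : Int) (bs : List Nat)
      (cur : List String) (ls : List (List String)),
      full.drop i = ts →
      bs.getLastD 0 ≤ i →
      cur = (full.drop (bs.getLastD 0)).take (i - bs.getLastD 0) →
      ls = sliceChain full 0 bs →
      preparseGo ts c ls cur = (preparseBounds ts i c bs).map (sliceChain full 0) := by
  intro ts
  induction ts with
  | nil =>
    intro i c bs cur ls _ _ _ hls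
    by_cases hc : c = 0 <;> simp [preparseGo, preparseBounds, hc, hls]
  | cons t ts ih =>
    intro i c bs cur ls hd hp hcur hls
    have hd' : full.drop (i + 1) = ts := by
      have h := congrArg (List.drop 1) hd
      simpa [List.drop_drop] using h
    have hsucc : (full.drop (bs.getLastD 0)).take (i + 1 - bs.getLastD 0) = cur ++ [t] := by
      rw [take_succ_of_drop full (bs.getLastD 0) i t ts hp hd, ← hcur]
    by_cases h1 : t = "("
    · simp only [preparseGo, preparseBounds, h1, if_true, if_pos (Or.inl rfl)]
      exact ih (i+1) (c+1) bs (cur ++ ["("]) ls hd' (by omega)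
        (by rw [hsucc, h1]) hls
    · by_cases h2 : t = "'("
      · simp only [preparseGo, preparseBounds, h1, h2, if_true, if_false,
          if_pos (Or.inr rfl)]
        exact ih (i+1) (c+1) bs (cur ++ ["'("]) ls hd' (by omega)
          (by rw [hsucc, h2]) hls
      · have hor : ¬ (t = "(" ∨ t = "'(") := by tauto
        by_cases h3 : t = ")"
        · by_cases hc0 : c = 0
          · simp [preparseGo, preparseBounds, h3, hc0, if_neg h1, if_neg h2, if_neg hor]
          · by_cases hc1 : c - 1 = 0
            · simp only [preparseGo, preparseBounds, h3, if_true,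
                if_neg h1, if_neg h2, if_neg hor, if_neg hc0, if_pos hc1]
              have hnewls : ls ++ [cur ++ [")"]] = sliceChain full 0 (bs ++ [i + 1]) := by
                rw [sliceChain_snoc, ← hls, hsucc, h3]
              refine ih (i+1) (c-1) (bs ++ [i+1]) [] (ls ++ [cur ++ [")"]]) hd' ?_ ?_ hnewls
              · simp
              · simp
            · simp only [preparseGo, preparseBounds, h3, if_true,
                if_neg h1, if_neg h2, if_neg hor, if_neg hc0, if_neg hc1]
              exact ih (i+1) (c-1) bs (cur ++ [")"]) ls hd' (by omega)
                (by rw [hsucc, h3]) hls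
        · simp only [preparseGo, preparseBounds, if_neg h1, if_neg h2, if_neg h3, if_neg hor]
          exact ih (i+1) c bs (cur ++ [t]) ls hd' (by omega) (by rw [hsucc]) hls

lemma preparse_eq_alt (tokens : List String) : preparse tokens = preparse_alt tokens := by
  unfold preparse preparse_alt
  by_cases h : tokens = []
  · simp [h]
  · simp only [h, if_false]
    have hmain := main_invariant tokens tokens 0 0 [] [] []
      (by simp) (by simp [List.getLastD]) (by simp [List.getLastD]) (by simp [sliceChain])
    rw [hmain]
    cases hb : preparseBounds tokens 0 0 [] with
    | none => simp
    | some bs => simp [sliceChain_eq_zipmap tokens bs 0]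

-- ===== VERDICT (by name: the statement is the Claim_ definition above) =====
theorem preparse_spec : Claim_equal_preparse := by
  intro tokens _ _
  unfold Spec_preparse
  exact preparse_eq_alt tokens
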